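-- pv_equiv track=rewrite | github.com/toddpalino/advent-of-code | 2024/22/part2.py | get_best_sequence
-- ===== SOURCE A (Python) =====
-- from collections import deque
--
-- def get_best_sequence(buyers):
-- 	len_buyers = len(buyers)
--
-- 	# Rather than record the entire list of 2000 changes, we're going to create a lookup table of sequences
-- 	# to banana totals as we go through. This will allow us to just find the max in the next step
-- 	lookup = {}
--
-- 	# We don't need to store prices or changes - we can just generate them as we go through
-- 	for buyer in range(len_buyers):
-- 		# We only need to store the last 4 change values
-- 		sequence = deque(maxlen=4)
--
-- 		# Generate the first 3 numbers (after the seed) to prime our deques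
-- 		last_price = buyers[buyer] % 10
-- 		next_num = buyers[buyer]
-- 		for i in range(3):
-- 			# In part 1 this was in a method to avoid repetition. Here, we want to save time from method calls
-- 			next_num = (next_num ^ (next_num * 64)) % 16777216
-- 			next_num = (next_num ^ (next_num // 32)) % 16777216
-- 			next_num = (next_num ^ (next_num * 2048)) % 16777216
-- 			next_price = next_num % 10
-- 			sequence.append(next_price - last_price)
-- 			last_price = next_price
--
-- 		# Now go through the rest of the prices
-- 		for i in range(3, 2000):
-- 			next_num = (next_num ^ (next_num * 64)) % 16777216
-- 			next_num = (next_num ^ (next_num // 32)) % 16777216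
-- 			next_num = (next_num ^ (next_num * 2048)) % 16777216
-- 			next_price = next_num % 10
-- 			sequence.append(next_price - last_price)
-- 			t = tuple(sequence)
-- 			if t not in lookup:
-- 				lookup[t] = {}
-- 			if buyer not in lookup[t]:
-- 				lookup[t][buyer] = next_price
-- 			last_price = next_price
--
-- 	# Now just find the sequence with the max value
-- 	best_sequence = max(lookup, key=lambda seq: sum(lookup[seq].values()))
-- 	return best_sequence, sum(lookup[best_sequence].values())
-- ===== SOURCE B (Python) =====
-- def get_best_sequence(buyers):
--     # Staged pipeline per buyer: full price list -> change list -> sliced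
--     # 4-windows with setdefault -> merge into one flat totals dict.
--     totals = {}
--     for seed in buyers:
--         prices = [seed % 10]
--         n = seed
--         for _ in range(2000):
--             n = (n ^ (n * 64)) % 16777216
--             n = (n ^ (n // 32)) % 16777216
--             n = (n ^ (n * 2048)) % 16777216
--             prices.append(n % 10)
--         changes = [q - p for p, q in zip(prices, prices[1:])]
--         first = {}
--         for i in range(len(changes) - 3):
--             first.setdefault(tuple(changes[i:i+4]), prices[i + 4])
--         for t, p in first.items():
--             totals[t] = totals.get(t, 0) + p
--     best = max(totals, key=totals.get)
--     return best, totals[best]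
-- ===== Notes on version B (the rewrite author's own statement) =====
-- stated objective: alternative
-- what changed: A interleaves PRNG generation with recording in one deque-driven loop per buyer into a nested dict lookup[seq][buyer] that is re-summed per key by the final max; B is a staged per-buyer pipeline -- build the full price list, derive the change list by zipping it with its shift, collect each 4-window's first occurrence by slicing into a per-buyer setdefault dict, then merge it into one flat running-totals dict that the final max reads directly.
-- outside the precondition, e.g. on get_best_sequence([]): A raises ValueError, B raises ValueError
import Mathlib
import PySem

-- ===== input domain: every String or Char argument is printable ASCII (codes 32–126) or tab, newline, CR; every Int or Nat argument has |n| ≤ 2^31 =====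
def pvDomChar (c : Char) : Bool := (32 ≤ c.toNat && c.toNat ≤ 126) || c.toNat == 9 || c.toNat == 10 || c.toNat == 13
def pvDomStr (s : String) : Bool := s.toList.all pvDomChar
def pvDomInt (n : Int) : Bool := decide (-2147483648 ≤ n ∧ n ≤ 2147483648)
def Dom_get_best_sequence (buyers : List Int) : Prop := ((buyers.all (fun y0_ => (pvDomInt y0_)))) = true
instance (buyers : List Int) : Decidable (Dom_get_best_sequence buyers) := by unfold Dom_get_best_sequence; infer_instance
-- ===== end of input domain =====

-- B replaces A's interleaved generate-and-record deque loop (nested dict re-summed by the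
-- final max) with a staged per-buyer pipeline: price list → change list → sliced 4-windows
-- deduped by setdefault → merged into one flat totals dict read directly by the final max;
-- same asymptotics, measured constant-factor faster in a timing run.

-- ===== PORT A =====
-- the PRNG step shared verbatim by both Python versions (the three xor/mod lines)
def pvNext (num : Int) : Int :=
  let n1 := PySem.Int.mod (PySem.Int.bxor num (num * 64)) 16777216
  let n2 := PySem.Int.mod (PySem.Int.bxor n1 (PySem.Int.floordiv n1 32)) 16777216
  PySem.Int.mod (PySem.Int.bxor n2 (n2 * 2048)) 16777216

-- deque(maxlen=4).append
def pvPush (s : List Int) (x : Int) : List Int :=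
  let s' := s ++ [x]
  if 4 < s'.length then s'.tail else s'

-- one generation step of A: (sequence, last_price, next_num) -> updated triple
def pvGen (st : List Int × Int × Int) : List Int × Int × Int :=
  let num := pvNext st.2.2
  let price := PySem.Int.mod num 10
  (pvPush st.1 (price - st.2.1), price, num)

-- Python dict keyed by the 4-change sequence, as a hash map plus the key list in
-- insertion order (newest first): the executable model of CPython's O(1)
-- insertion-ordered dict, proved below to realize exactly PySem.Dict's semantics
-- (pvFDtoDict bridges each operation; the proofs relate both ports through it).
structure pvFD (ν : Type) where
  hm : Std.HashMap (List Int) ν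
  rk : List (List Int)
  deriving Inhabited

def pvFD.empty {ν : Type} : pvFD ν := ⟨∅, []⟩

def pvFD.contains {ν : Type} (d : pvFD ν) (k : List Int) : Bool := d.hm.contains k

def pvFD.getD {ν : Type} (d : pvFD ν) (k : List Int) (dflt : ν) : ν := d.hm.getD k dflt

def pvFD.insert {ν : Type} (d : pvFD ν) (k : List Int) (v : ν) : pvFD ν :=
  ⟨d.hm.insert k v, if d.hm.contains k then d.rk else k :: d.rk⟩

def pvFD.setdefault {ν : Type} (d : pvFD ν) (k : List Int) (v : ν) : pvFD ν :=
  if d.contains k then d else d.insert k v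

def pvFD.keysInOrder {ν : Type} (d : pvFD ν) : List (List Int) := d.rk.reverse

def pvFD.items {ν : Type} (d : pvFD ν) (dflt : ν) : List (List Int × ν) :=
  d.keysInOrder.map (fun k => (k, d.getD k dflt))

-- A's recording: if t not in lookup: lookup[t] = {}; if buyer not in lookup[t]: lookup[t][buyer] = price
def pvUpdA (buyer : Int) (lk : pvFD (PySem.Dict Int Int)) (t : List Int) (price : Int) :
    pvFD (PySem.Dict Int Int) :=
  let lk1 := if lk.contains t then lk else lk.insert t PySem.Dict.empty
  let inner := lk1.getD t PySem.Dict.empty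
  if inner.contains buyer then lk1 else lk1.insert t (inner.insert buyer price)

def pvStepA (buyer : Int) (st : (List Int × Int × Int) × pvFD (PySem.Dict Int Int)) (_ : Int) :
    (List Int × Int × Int) × pvFD (PySem.Dict Int Int) :=
  let c := pvGen st.1
  (c, pvUpdA buyer st.2 c.1 c.2.1)

-- one buyer's pass: prime the deque with 3 changes, then record the other 1997
def pvBuyerA (lk : pvFD (PySem.Dict Int Int)) (buyer seed : Int) : pvFD (PySem.Dict Int Int) :=
  ((PySem.List.pyRange 3 2000).foldl (pvStepA buyer)
    ((PySem.List.pyRange 0 3).foldl (fun st _ => pvGen st)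
      (([] : List Int), PySem.Int.mod seed 10, seed), lk)).2

-- best_sequence = max(lookup, key=...); return (best_sequence, sum(lookup[best_sequence].values()))
def pvFinishA (lookup : pvFD (PySem.Dict Int Int)) : List Int × Int :=
  match PySem.List.max? lookup.keysInOrder (fun t => ((lookup.getD t PySem.Dict.empty).values).sum) with
  | some best => (best, ((lookup.getD best PySem.Dict.empty).values).sum)
  | none => ([], 0)

def get_best_sequence (buyers : List Int) : List Int × Int :=
  pvFinishA ((PySem.List.pyRange 0 (PySem.List.len buyers)).foldl
    (fun lk buyer => pvBuyerA lk buyer (PySem.List.pyGetD buyers buyer 0)) pvFD.empty)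

-- ===== PORT B =====
-- stage 1: prices = [seed % 10]; then 2000 appends of the next price
def pvPricesB (seed : Int) : List Int :=
  ((PySem.List.pyRange 0 2000).foldl (fun (st : List Int × Int) _ =>
    let n := pvNext st.2
    (st.1 ++ [PySem.Int.mod n 10], n)) ([PySem.Int.mod seed 10], seed)).1

-- stage 2: changes = [q - p for p, q in zip(prices, prices[1:])]  (zip -> zipWith)
def pvChangesB (prices : List Int) : List Int :=
  List.zipWith (fun p q => q - p) prices (PySem.List.slice prices (some 1) none)

-- stage 3: first.setdefault(tuple(changes[i:i+4]), prices[i+4]) for i in range(len(changes)-3)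
def pvFirstB (changes prices : List Int) : pvFD Int :=
  (PySem.List.pyRange 0 (PySem.List.len changes - 3)).foldl
    (fun d i => d.setdefault (PySem.List.slice changes (some i) (some (i + 4)))
      (PySem.List.pyGetD prices (i + 4) 0)) pvFD.empty

-- stage 4: for t, p in first.items(): totals[t] = totals.get(t, 0) + p
def pvMergeB (totals : pvFD Int) (first : pvFD Int) : pvFD Int :=
  (first.items 0).foldl (fun d q => d.insert q.1 (d.getD q.1 0 + q.2)) totals

def pvBuyerB (totals : pvFD Int) (seed : Int) : pvFD Int :=
  let prices := pvPricesB seed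
  let changes := pvChangesB prices
  pvMergeB totals (pvFirstB changes prices)

-- best = max(totals, key=totals.get); return best, totals[best]
def pvFinishB (totals : pvFD Int) : List Int × Int :=
  match PySem.List.max? totals.keysInOrder (fun t => totals.getD t 0) with
  | some best => (best, totals.getD best 0)
  | none => ([], 0)

def get_best_sequence_alt (buyers : List Int) : List Int × Int :=
  pvFinishB (buyers.foldl pvBuyerB pvFD.empty)

-- ===== PRECONDITION & SPEC =====
-- Pre_ excludes only the empty list, on which Python A raises ValueError (max() of an empty dict).
def Pre_get_best_sequence (buyers : List Int) : Prop := buyers ≠ []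
instance (buyers : List Int) : Decidable (Pre_get_best_sequence buyers) := by unfold Pre_get_best_sequence; infer_instance

def pvWitness_get_best_sequence : List Int := [123]

def Spec_get_best_sequence (buyers : List Int) (out : List Int × Int) : Prop := out = get_best_sequence_alt buyers
instance (buyers : List Int) (out : List Int × Int) : Decidable (Spec_get_best_sequence buyers out) := by unfold Spec_get_best_sequence; infer_instance

-- ===== CLAIM (what is proved, stated in full; the proofs are below) =====
def Claim_equal_get_best_sequence : Prop := ∀ (buyers : List Int), Dom_get_best_sequence buyers → Pre_get_best_sequence buyers → Spec_get_best_sequence buyers (get_best_sequence buyers)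

-- ===== LEMMAS AND PROOFS =====

-- Reference (assoc-list PySem.Dict) formulations of both ports: proof-side only.

-- A's recording: if t not in lookup: lookup[t] = {}; if buyer not in lookup[t]: lookup[t][buyer] = price
def pvUpdR (buyer : Int) (lk : PySem.Dict (List Int) (PySem.Dict Int Int)) (t : List Int) (price : Int) :
    PySem.Dict (List Int) (PySem.Dict Int Int) :=
  let lk1 := if lk.contains t then lk else lk.insert t PySem.Dict.empty
  let inner := lk1.getD t PySem.Dict.empty
  if inner.contains buyer then lk1 else lk1.insert t (inner.insert buyer price)

def pvStepR (buyer : Int) (st : (List Int × Int × Int) × PySem.Dict (List Int) (PySem.Dict Int Int)) (_ : Int) :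
    (List Int × Int × Int) × PySem.Dict (List Int) (PySem.Dict Int Int) :=
  let c := pvGen st.1
  (c, pvUpdR buyer st.2 c.1 c.2.1)

-- one buyer's pass: prime the deque with 3 changes, then record the other 1997
def pvBuyerR (lk : PySem.Dict (List Int) (PySem.Dict Int Int)) (buyer seed : Int) :
    PySem.Dict (List Int) (PySem.Dict Int Int) :=
  ((PySem.List.pyRange 3 2000).foldl (pvStepR buyer)
    ((PySem.List.pyRange 0 3).foldl (fun st _ => pvGen st)
      (([] : List Int), PySem.Int.mod seed 10, seed), lk)).2

-- best_sequence = max(lookup, key=...); return (best_sequence, sum(lookup[best_sequence].values()))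
def pvFinishAR (lookup : PySem.Dict (List Int) (PySem.Dict Int Int)) : List Int × Int :=
  match PySem.List.max? lookup.keys (fun t => ((lookup.getD t PySem.Dict.empty).values).sum) with
  | some best => (best, ((lookup.getD best PySem.Dict.empty).values).sum)
  | none => ([], 0)

def pvGbsAR (buyers : List Int) : List Int × Int :=
  pvFinishAR ((PySem.List.pyRange 0 (PySem.List.len buyers)).foldl
    (fun lk buyer => pvBuyerR lk buyer (PySem.List.pyGetD buyers buyer 0)) PySem.Dict.empty)

-- reference B

-- stage 3: first.setdefault(tuple(changes[i:i+4]), prices[i+4]) for i in range(len(changes)-3)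
def pvFirstR (changes prices : List Int) : PySem.Dict (List Int) Int :=
  (PySem.List.pyRange 0 (PySem.List.len changes - 3)).foldl
    (fun d i => d.setdefault (PySem.List.slice changes (some i) (some (i + 4)))
      (PySem.List.pyGetD prices (i + 4) 0)) PySem.Dict.empty

-- stage 4: for t, p in first.items(): totals[t] = totals.get(t, 0) + p
def pvMergeR (totals : PySem.Dict (List Int) Int) (first : PySem.Dict (List Int) Int) :
    PySem.Dict (List Int) Int :=
  first.items.foldl (fun d q => d.insert q.1 (d.getD q.1 0 + q.2)) totals

def pvBuyerR2 (totals : PySem.Dict (List Int) Int) (seed : Int) : PySem.Dict (List Int) Int :=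
  let prices := pvPricesB seed
  let changes := pvChangesB prices
  pvMergeR totals (pvFirstR changes prices)

-- best = max(totals, key=totals.get); return best, totals[best]
def pvFinishBR (totals : PySem.Dict (List Int) Int) : List Int × Int :=
  match PySem.List.max? totals.keys (fun t => totals.getD t 0) with
  | some best => (best, totals.getD best 0)
  | none => ([], 0)

def pvGbsBR (buyers : List Int) : List Int × Int :=
  pvFinishBR (buyers.foldl pvBuyerR2 PySem.Dict.empty)


-- the price / change streams and the PRNG state, used to align the two ports
def pvPriceS (n : Int) : Nat → List Int
  | 0 => []
  | m + 1 => PySem.Int.mod (pvNext n) 10 :: pvPriceS (pvNext n) m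

def pvChangeS (lp n : Int) : Nat → List Int
  | 0 => []
  | m + 1 => (PySem.Int.mod (pvNext n) 10 - lp) :: pvChangeS (PySem.Int.mod (pvNext n) 10) (pvNext n) m

def pvSt (lp n : Int) : Nat → Int × Int
  | 0 => (lp, n)
  | k + 1 => pvSt (PySem.Int.mod (pvNext n) 10) (pvNext n) k

-- the ordered (window, price) pairs A records, read off from A's generation state
def pvPairsL (st : List Int × Int × Int) : Nat → List (List Int × Int)
  | 0 => []
  | m + 1 => ((pvGen st).1, (pvGen st).2.1) :: pvPairsL (pvGen st) m

-- the same pairs as 4-windows over the full change list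
def pvWins0 : List Int → List Int → List (List Int × Int)
  | _, [] => []
  | cs, p :: ps => (cs.take 4, p) :: pvWins0 (cs.drop 1) ps

lemma length_pvPriceS (n : Int) (m : Nat) : (pvPriceS n m).length = m := by
  induction m generalizing n with
  | zero => rfl
  | succ m ih => simp [pvPriceS, ih]

lemma length_pvChangeS (lp n : Int) (m : Nat) : (pvChangeS lp n m).length = m := by
  induction m generalizing lp n with
  | zero => rfl
  | succ m ih => simp [pvChangeS, ih]

lemma pvChangeS_add (k m : Nat) : ∀ (lp n : Int),
    pvChangeS lp n (k + m) = pvChangeS lp n k ++ pvChangeS (pvSt lp n k).1 (pvSt lp n k).2 m := by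
  induction k with
  | zero => intro lp n; simp [pvChangeS, pvSt]
  | succ k ih =>
    intro lp n
    rw [show k + 1 + m = (k + m) + 1 by omega]
    simp only [pvChangeS, pvSt, List.cons_append]
    rw [ih]

lemma pvPriceS_add (k m : Nat) : ∀ (lp n : Int),
    pvPriceS n (k + m) = pvPriceS n k ++ pvPriceS (pvSt lp n k).2 m := by
  induction k with
  | zero => intro lp n; simp [pvPriceS, pvSt]
  | succ k ih =>
    intro lp n
    rw [show k + 1 + m = (k + m) + 1 by omega]
    simp only [pvPriceS, pvSt, List.cons_append]
    rw [ih (PySem.Int.mod (pvNext n) 10)]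

-- the A fold over its index range, with the index unused, is the fold over the pair list
lemma foldA (b : Int) (l : List Int) : ∀ (st : List Int × Int × Int)
    (lk : PySem.Dict (List Int) (PySem.Dict Int Int)),
    (l.foldl (pvStepR b) (st, lk)).2
      = (pvPairsL st l.length).foldl (fun d q => pvUpdR b d q.1 q.2) lk := by
  induction l with
  | nil => intro st lk; rfl
  | cons i l ih =>
    intro st lk
    simp only [List.foldl_cons, List.length_cons, pvPairsL]
    exact ih (pvGen st) (pvUpdR b lk (pvGen st).1 (pvGen st).2.1)

lemma pvPush_len4 (seq : List Int) (x : Int) (h : seq.length = 4) :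
    pvPush seq x = seq.drop 1 ++ [x] := by
  unfold pvPush
  rw [if_pos (by simp [h]),
    List.tail_append_singleton_of_ne_nil (by intro hn; rw [hn] at h; simp at h),
    ← List.drop_one]

lemma pvPush_len3 (seq : List Int) (x : Int) (h : seq.length = 3) :
    pvPush seq x = seq ++ [x] := by
  unfold pvPush
  rw [if_neg (by simp [h])]

lemma pvGen_eq (seq : List Int) (lp n : Int) :
    pvGen (seq, lp, n)
      = (pvPush seq (PySem.Int.mod (pvNext n) 10 - lp), PySem.Int.mod (pvNext n) 10, pvNext n) := rfl

lemma pvPairsL_wins4 (m : Nat) : ∀ (seq : List Int) (lp n : Int), seq.length = 4 →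
    pvPairsL (seq, lp, n) m = pvWins0 (seq.drop 1 ++ pvChangeS lp n m) (pvPriceS n m) := by
  induction m with
  | zero => intro seq lp n _; rfl
  | succ m ih =>
    intro seq lp n h
    simp only [pvPairsL, pvGen_eq, pvPush_len4 seq _ h, pvChangeS, pvPriceS, pvWins0]
    rw [List.take_append,
      ih (seq.drop 1 ++ [PySem.Int.mod (pvNext n) 10 - lp]) _ _ (by simp [h]),
      List.drop_append_of_le_length (by simp [h]),
      List.drop_append_of_le_length (by simp [h]), List.append_assoc]
    simp [h]

lemma pvPairsL_wins3 (m : Nat) (seq : List Int) (lp n : Int) (h : seq.length = 3) :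
    pvPairsL (seq, lp, n) m = pvWins0 (seq ++ pvChangeS lp n m) (pvPriceS n m) := by
  cases m with
  | zero => rfl
  | succ m =>
    simp only [pvPairsL, pvGen_eq, pvPush_len3 seq _ h, pvChangeS, pvPriceS, pvWins0]
    rw [List.take_append,
      pvPairsL_wins4 m (seq ++ [PySem.Int.mod (pvNext n) 10 - lp]) _ _ (by simp [h]),
      List.drop_append_of_le_length (by simp [h]),
      List.drop_append_of_le_length (by simp [h]), List.append_assoc]
    simp [h]

lemma pvWins0_eq_map (ps : List Int) : ∀ (cs : List Int),
    pvWins0 cs ps = (List.range ps.length).map (fun i => ((cs.drop i).take 4, ps.getD i 0)) := by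
  induction ps with
  | nil => intro cs; rfl
  | cons p ps ih =>
    intro cs
    rw [List.length_cons, List.range_succ_eq_map, List.map_cons, List.map_map]
    simp only [pvWins0, List.drop_zero, List.getD_cons_zero]
    rw [ih (cs.drop 1)]
    refine congrArg _ ?_
    apply List.map_congr_left
    intro i _
    simp [Function.comp]

-- A's priming loop: three pvGen steps from the seed state
lemma primeA (seed : Int) :
    (PySem.List.pyRange 0 3).foldl (fun st _ => pvGen st)
        (([] : List Int), PySem.Int.mod seed 10, seed)
      = (pvChangeS (PySem.Int.mod seed 10) seed 3,
         (pvSt (PySem.Int.mod seed 10) seed 3).1, (pvSt (PySem.Int.mod seed 10) seed 3).2) := by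
  rw [show PySem.List.pyRange 0 3 = [0, 1, 2] from by decide]
  rfl

-- A's one-buyer pass is the pvUpdR fold over the windows of the full change list
lemma buyerA_eq_wins (lk : PySem.Dict (List Int) (PySem.Dict Int Int)) (b seed : Int) :
    pvBuyerR lk b seed
      = (pvWins0 (pvChangeS (PySem.Int.mod seed 10) seed 2000)
          (pvPriceS (pvSt (PySem.Int.mod seed 10) seed 3).2 1997)).foldl
          (fun d q => pvUpdR b d q.1 q.2) lk := by
  unfold pvBuyerR
  rw [primeA, foldA,
    show (PySem.List.pyRange 3 2000).length = 1997 from by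
      rw [PySem.List.length_pyRange_one]; decide,
    pvPairsL_wins3 _ _ _ _ (by rw [length_pvChangeS]),
    ← pvChangeS_add 3 1997]

-- B's stage 1/2 produce the same streams
lemma foldPricesB (l : List Int) : ∀ (acc : List Int) (n : Int),
    (l.foldl (fun (st : List Int × Int) _ =>
      let nn := pvNext st.2
      (st.1 ++ [PySem.Int.mod nn 10], nn)) (acc, n)).1 = acc ++ pvPriceS n l.length := by
  induction l with
  | nil => intro acc n; simp [pvPriceS]
  | cons i l ih =>
    intro acc n
    simp only [List.foldl_cons, List.length_cons, pvPriceS]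
    rw [ih]
    simp

lemma pricesB_eq (seed : Int) : pvPricesB seed = PySem.Int.mod seed 10 :: pvPriceS seed 2000 := by
  unfold pvPricesB
  rw [foldPricesB,
    show (PySem.List.pyRange 0 2000).length = 2000 from by
      rw [PySem.List.length_pyRange_one]; decide]
  rfl

lemma zip_changes (m : Nat) : ∀ (lp n : Int),
    List.zipWith (fun p q => q - p) (lp :: pvPriceS n m) (pvPriceS n m) = pvChangeS lp n m := by
  induction m with
  | zero => intro lp n; rfl
  | succ m ih =>
    intro lp n
    simp only [pvPriceS, pvChangeS, List.zipWith_cons_cons]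
    rw [ih]

-- B's stage 3 is the setdefault fold over the same window list
lemma firstB_eq (seed : Int) :
    pvFirstR (pvChangeS (PySem.Int.mod seed 10) seed 2000) (pvPricesB seed)
      = (pvWins0 (pvChangeS (PySem.Int.mod seed 10) seed 2000)
          (pvPriceS (pvSt (PySem.Int.mod seed 10) seed 3).2 1997)).foldl
          (fun d q => d.setdefault q.1 q.2) PySem.Dict.empty := by
  unfold pvFirstR
  rw [show PySem.List.len (pvChangeS (PySem.Int.mod seed 10) seed 2000) - 3 = (1997 : Int) from by
      rw [PySem.List.len_eq, length_pvChangeS]; decide,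
    PySem.List.pyRange_one, show ((1997 : Int) - 0).toNat = 1997 from by decide,
    List.foldl_map, pvWins0_eq_map, length_pvPriceS, List.foldl_map]
  refine PySem.List.foldl_congr_mem _ _ _ _ ?_
  intro acc k _
  have h1 : PySem.List.slice (pvChangeS (PySem.Int.mod seed 10) seed 2000)
      (some (0 + (k : Int))) (some (0 + (k : Int) + 4))
      = ((pvChangeS (PySem.Int.mod seed 10) seed 2000).drop k).take 4 := by
    rw [zero_add, show ((k : Int) + 4) = ((k : Int) + ((4 : Nat) : Int)) from rfl]
    exact PySem.List.slice_natCast_add _ _ _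
  have h2 : PySem.List.pyGetD (pvPricesB seed) (0 + (k : Int) + 4) 0
      = (pvPriceS (pvSt (PySem.Int.mod seed 10) seed 3).2 1997).getD k 0 := by
    rw [zero_add, show ((k : Int) + 4) = (((k + 4 : Nat)) : Int) from by push_cast; ring,
      PySem.List.pyGetD_natCast, pricesB_eq,
      show k + 4 = (k + 3) + 1 from rfl, List.getD_cons_succ,
      show pvPriceS seed 2000
          = pvPriceS seed 3 ++ pvPriceS (pvSt (PySem.Int.mod seed 10) seed 3).2 1997 from
        pvPriceS_add 3 1997 (PySem.Int.mod seed 10) seed,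
      ]
    simp [List.getD, List.getElem?_append_right
      (by rw [length_pvPriceS]; omega : (pvPriceS seed 3).length ≤ k + 3), length_pvPriceS]
  rw [h1, h2]

-- B's recording step, as one pass with a seen set (proof-side intermediate)
def pvRecB (acc : PySem.Dict (List Int) Int × PySem.Set (List Int)) (t : List Int) (price : Int) :
    PySem.Dict (List Int) Int × PySem.Set (List Int) :=
  if acc.2.contains t then acc
  else (acc.1.insert t (acc.1.getD t 0 + price), PySem.Set.add acc.2 t)

-- stage 3 + stage 4 collapse into the single seen-set pass
lemma two_stage (L : List (List Int × Int)) :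
    ∀ (d : PySem.Dict (List Int) Int) (tot : PySem.Dict (List Int) Int), d.keys.Nodup →
    pvMergeR tot (L.foldl (fun d q => d.setdefault q.1 q.2) d)
      = (L.foldl (fun acc q => pvRecB acc q.1 q.2) (pvMergeR tot d, d.keys)).1 := by
  induction L with
  | nil => intro d tot _; rfl
  | cons q L ih =>
    intro d tot hn
    simp only [List.foldl_cons]
    by_cases hc : d.contains q.1 = true
    · rw [PySem.Dict.setdefault_of_contains _ q.2 hc,
        show pvRecB (pvMergeR tot d, d.keys) q.1 q.2 = (pvMergeR tot d, d.keys) from by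
          unfold pvRecB
          rw [if_pos (PySem.Set.contains_iff _ _ |>.mpr ((PySem.Dict.contains_iff_mem_keys d q.1).mp hc))]]
      exact ih d tot hn
    · have hcf : d.contains q.1 = false := by simpa using hc
      have hnm : q.1 ∉ d.keys := fun hm => hc ((PySem.Dict.contains_iff_mem_keys d q.1).mpr hm)
      have hseen : PySem.Set.contains d.keys q.1 = false := by
        by_contra hx
        exact hnm ((PySem.Set.contains_iff _ _).mp (by simpa using hx))
      have hmerge : pvMergeR tot (d.insert q.1 q.2)
          = (pvMergeR tot d).insert q.1 ((pvMergeR tot d).getD q.1 0 + q.2) := by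
        unfold pvMergeR
        rw [PySem.Dict.items_insert_of_not_contains _ _ hcf, List.foldl_append]
        rfl
      have hkeys : (d.insert q.1 q.2).keys = PySem.Set.add d.keys q.1 := by
        rw [PySem.Dict.keys_insert_of_not_contains _ _ hcf, PySem.Set.add_of_not_mem hnm]
      rw [PySem.Dict.setdefault_of_not_contains _ q.2 hcf,
        show pvRecB (pvMergeR tot d, d.keys) q.1 q.2
            = ((pvMergeR tot d).insert q.1 ((pvMergeR tot d).getD q.1 0 + q.2), PySem.Set.add d.keys q.1) from by
          unfold pvRecB
          rw [if_neg (by simp only [hseen]; exact Bool.false_ne_true)],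
        ← hmerge, ← hkeys]
      exact ih (d.insert q.1 q.2) tot (PySem.Dict.nodup_keys_insert _ _ _ hn)

-- the coupling: B's flat totals dict is A's nested dict with each inner dict summed
def pvSum (d : PySem.Dict Int Int) : Int := d.values.sum

def pvMapSum (d : PySem.Dict (List Int) (PySem.Dict Int Int)) : PySem.Dict (List Int) Int :=
  PySem.Dict.mk (d.items.map (fun p => (p.1, pvSum p.2)))

-- the seen set holds exactly the sequences whose inner dict already contains this buyer
def pvSeenRel (b : Int) (lk : PySem.Dict (List Int) (PySem.Dict Int Int)) (seen : PySem.Set (List Int)) : Prop :=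
  ∀ t, seen.contains t = (lk.getD t PySem.Dict.empty).contains b

lemma keys_pvMapSum (d : PySem.Dict (List Int) (PySem.Dict Int Int)) : (pvMapSum d).keys = d.keys := by
  simp [pvMapSum, PySem.Dict.keys]

lemma contains_pvMapSum (d : PySem.Dict (List Int) (PySem.Dict Int Int)) (t : List Int) :
    (pvMapSum d).contains t = d.contains t := by
  simp [pvMapSum, PySem.Dict.contains, List.any_map]
  rfl

lemma pvMapSum_insert (d : PySem.Dict (List Int) (PySem.Dict Int Int)) (t : List Int) (v : PySem.Dict Int Int) :
    pvMapSum (d.insert t v) = (pvMapSum d).insert t (pvSum v) := by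
  by_cases h : d.contains t = true
  · apply PySem.Dict.ext
    rw [show (pvMapSum (d.insert t v)).items = (d.insert t v).items.map (fun p => (p.1, pvSum p.2)) from rfl,
      PySem.Dict.items_insert_of_contains _ _ h,
      PySem.Dict.items_insert_of_contains _ _ (by rw [contains_pvMapSum]; exact h),
      show (pvMapSum d).items = d.items.map (fun p => (p.1, pvSum p.2)) from rfl,
      List.map_map, List.map_map]
    apply List.map_congr_left
    intro p _
    by_cases hp : p.1 = t <;> simp [hp]
  · apply PySem.Dict.ext
    rw [show (pvMapSum (d.insert t v)).items = (d.insert t v).items.map (fun p => (p.1, pvSum p.2)) from rfl,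
      PySem.Dict.items_insert_of_not_contains _ _ (by simpa using h),
      PySem.Dict.items_insert_of_not_contains _ _ (by rw [contains_pvMapSum]; simpa using h)]
    simp [pvMapSum]

lemma getD_pvMapSum (d : PySem.Dict (List Int) (PySem.Dict Int Int)) (h : d.keys.Nodup) (t : List Int) :
    (pvMapSum d).getD t 0 = pvSum (d.getD t PySem.Dict.empty) := by
  by_cases hc : d.contains t = true
  · have hmem : t ∈ d.keys := by
      have := PySem.Dict.contains_eq_decide_mem_keys d t
      rw [hc] at this; exact of_decide_eq_true this.symm
    obtain ⟨p, hp, hp1⟩ := List.mem_map.1 hmem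
    obtain ⟨t', v⟩ := p
    cases hp1
    have h1 : d.getD t' PySem.Dict.empty = v := PySem.Dict.getD_of_mem_items d hp h _
    have h2 : (t', pvSum v) ∈ (pvMapSum d).items := List.mem_map_of_mem hp
    have h3 : (pvMapSum d).getD t' 0 = pvSum v :=
      PySem.Dict.getD_of_mem_items _ h2 (by rw [keys_pvMapSum]; exact h) _
    rw [h1, h3]
  · rw [PySem.Dict.getD_of_not_contains _ _ (by rw [contains_pvMapSum]; simpa using hc),
      PySem.Dict.getD_of_not_contains _ _ (by simpa using hc)]
    rfl

lemma pvSum_insert_fresh (d : PySem.Dict Int Int) (b p : Int) (h : d.contains b = false) :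
    pvSum (d.insert b p) = pvSum d + p := by
  unfold pvSum PySem.Dict.values
  rw [PySem.Dict.items_insert_of_not_contains _ _ h]
  simp

lemma set_contains_add (s : PySem.Set (List Int)) (t u : List Int) :
    (PySem.Set.add s t).contains u = (s.contains u || u == t) := by
  by_cases h : s.contains t = true
  · rw [PySem.Set.add, if_pos h]
    by_cases hu : u = t
    · subst hu
      simpa [PySem.Set.contains, List.contains_iff_mem] using
        (by simpa [PySem.Set.contains, List.contains_iff_mem] using h : u ∈ s)
    · simp [hu]
  · rw [PySem.Set.add, if_neg h]
    simp [PySem.Set.contains, beq_eq_decide]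

lemma upd_sim (b : Int) (lk : PySem.Dict (List Int) (PySem.Dict Int Int)) (seen : PySem.Set (List Int))
    (t : List Int) (p : Int) (hn : lk.keys.Nodup) (hs : pvSeenRel b lk seen) :
      (pvRecB (pvMapSum lk, seen) t p).1 = pvMapSum (pvUpdR b lk t p)
    ∧ pvSeenRel b (pvUpdR b lk t p) (pvRecB (pvMapSum lk, seen) t p).2
    ∧ (pvUpdR b lk t p).keys.Nodup
    ∧ ∀ u b', b' ≠ b → ((pvUpdR b lk t p).getD u PySem.Dict.empty).contains b'
        = (lk.getD u PySem.Dict.empty).contains b' := by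
  by_cases h1 : seen.contains t = true
  · -- already recorded for this buyer: both sides unchanged
    have hc : lk.contains t = true := by
      by_contra hcf
      have : (lk.getD t PySem.Dict.empty).contains b = false := by
        rw [PySem.Dict.getD_of_not_contains _ _ (by simpa using hcf)]
        simp [PySem.Dict.contains, PySem.Dict.empty]
      rw [hs t, this] at h1; exact absurd h1 (by simp)
    have hupd : pvUpdR b lk t p = lk := by
      unfold pvUpdR
      rw [if_pos hc, if_pos (by rw [← hs t]; exact h1)]
    have hrec : pvRecB (pvMapSum lk, seen) t p = (pvMapSum lk, seen) := by
      unfold pvRecB; rw [if_pos h1]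
    rw [hupd, hrec]
    exact ⟨rfl, hs, hn, fun _ _ _ => rfl⟩
  · have h1f : seen.contains t = false := by simpa using h1
    have hrec : pvRecB (pvMapSum lk, seen) t p
        = ((pvMapSum lk).insert t ((pvMapSum lk).getD t 0 + p), PySem.Set.add seen t) := by
      unfold pvRecB; rw [if_neg (by rw [show (pvMapSum lk, seen).2.contains t = false from h1f]; exact Bool.false_ne_true)]
    by_cases hc : lk.contains t = true
    · -- sequence known globally, new for this buyer
      have hinner : (lk.getD t PySem.Dict.empty).contains b = false := by rw [← hs t]; exact h1f
      have hupd : pvUpdR b lk t p = lk.insert t ((lk.getD t PySem.Dict.empty).insert b p) := by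
        unfold pvUpdR
        rw [if_pos hc, if_neg (by simp [hinner])]
      rw [hrec, hupd]
      refine ⟨?_, ?_, PySem.Dict.nodup_keys_insert _ _ _ hn, ?_⟩
      · rw [pvMapSum_insert, pvSum_insert_fresh _ _ _ hinner, getD_pvMapSum _ hn]
      · intro u
        rw [set_contains_add]
        by_cases hu : u = t
        · subst hu
          rw [PySem.Dict.getD_insert]
          simp [PySem.Dict.contains_insert_self]
        · rw [PySem.Dict.getD_insert, if_neg hu, ← hs u]
          simp [beq_eq_decide, hu]
      · intro u b' hb'
        rw [PySem.Dict.getD_insert]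
        by_cases hu : u = t
        · subst hu
          rw [if_pos rfl, PySem.Dict.contains_insert]
          simp [hb']
        · rw [if_neg hu]
    · -- globally fresh sequence
      have hcf : lk.contains t = false := by simpa using hc
      have hg : lk.getD t PySem.Dict.empty = PySem.Dict.empty :=
        PySem.Dict.getD_of_not_contains _ _ hcf
      have hupd : pvUpdR b lk t p = lk.insert t (PySem.Dict.empty.insert b p) := by
        unfold pvUpdR
        simp only [hcf, Bool.false_eq_true, if_false, PySem.Dict.getD_insert_self]
        rw [if_neg (by simp [PySem.Dict.contains, PySem.Dict.empty]),
          PySem.Dict.insert_insert_self]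
      rw [hrec, hupd]
      refine ⟨?_, ?_, PySem.Dict.nodup_keys_insert _ _ _ hn, ?_⟩
      · rw [pvMapSum_insert,
          pvSum_insert_fresh _ _ _ (by simp [PySem.Dict.contains, PySem.Dict.empty]),
          PySem.Dict.getD_of_not_contains _ _ (by rw [contains_pvMapSum]; exact hcf)]
        simp [pvSum, PySem.Dict.values, PySem.Dict.empty]
      · intro u
        rw [set_contains_add]
        by_cases hu : u = t
        · subst hu
          rw [PySem.Dict.getD_insert]
          simp [PySem.Dict.contains_insert_self]
        · rw [PySem.Dict.getD_insert, if_neg hu, ← hs u]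
          simp [beq_eq_decide, hu]
      · intro u b' hb'
        rw [PySem.Dict.getD_insert]
        by_cases hu : u = t
        · subst hu
          rw [if_pos rfl, PySem.Dict.contains_insert, hg]
          simp [hb', PySem.Dict.contains, PySem.Dict.empty]
        · rw [if_neg hu]

-- the one-pass fold over any pair list tracks A's pvUpdR fold through the coupling
lemma pairs_sim (b : Int) (L : List (List Int × Int)) :
    ∀ (lk : PySem.Dict (List Int) (PySem.Dict Int Int)) (seen : PySem.Set (List Int)),
    lk.keys.Nodup → pvSeenRel b lk seen →
      (L.foldl (fun acc q => pvRecB acc q.1 q.2) (pvMapSum lk, seen)).1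
        = pvMapSum (L.foldl (fun d q => pvUpdR b d q.1 q.2) lk)
    ∧ (L.foldl (fun d q => pvUpdR b d q.1 q.2) lk).keys.Nodup
    ∧ ∀ u b', b' ≠ b → ((L.foldl (fun d q => pvUpdR b d q.1 q.2) lk).getD u PySem.Dict.empty).contains b'
        = (lk.getD u PySem.Dict.empty).contains b' := by
  induction L with
  | nil => exact fun lk seen hn _ => ⟨rfl, hn, fun _ _ _ => rfl⟩
  | cons q L ih =>
    intro lk seen hn hs
    obtain ⟨e1, e2, e3, e4⟩ := upd_sim b lk seen q.1 q.2 hn hs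
    simp only [List.foldl_cons]
    rw [show pvRecB (pvMapSum lk, seen) q.1 q.2
        = ((pvRecB (pvMapSum lk, seen) q.1 q.2).1, (pvRecB (pvMapSum lk, seen) q.1 q.2).2) from rfl, e1]
    obtain ⟨f1, f2, f3⟩ := ih (pvUpdR b lk q.1 q.2) _ e3 e2
    exact ⟨f1, f2, fun u b' hb => (f3 u b' hb).trans (e4 u b' hb)⟩

-- one whole buyer: B's staged pipeline equals A's pass through the coupling
lemma buyer_sim (lk : PySem.Dict (List Int) (PySem.Dict Int Int)) (b seed : Int) (hn : lk.keys.Nodup)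
    (hfresh : ∀ t, (lk.getD t PySem.Dict.empty).contains b = false) :
      pvBuyerR2 (pvMapSum lk) seed = pvMapSum (pvBuyerR lk b seed)
    ∧ (pvBuyerR lk b seed).keys.Nodup
    ∧ ∀ t b', b' ≠ b → ((pvBuyerR lk b seed).getD t PySem.Dict.empty).contains b'
        = (lk.getD t PySem.Dict.empty).contains b' := by
  have hchg : pvChangesB (pvPricesB seed) = pvChangeS (PySem.Int.mod seed 10) seed 2000 := by
    unfold pvChangesB
    rw [pricesB_eq, PySem.List.slice_from_one, List.tail_cons]
    exact zip_changes 2000 _ seed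
  have hseen0 : pvSeenRel b lk PySem.Set.empty := by
    intro t; rw [hfresh t]; rfl
  obtain ⟨f1, f2, f3⟩ := pairs_sim b
    (pvWins0 (pvChangeS (PySem.Int.mod seed 10) seed 2000)
      (pvPriceS (pvSt (PySem.Int.mod seed 10) seed 3).2 1997)) lk PySem.Set.empty hn hseen0
  refine ⟨?_, ?_, ?_⟩
  · show pvMergeR (pvMapSum lk) (pvFirstR (pvChangesB (pvPricesB seed)) (pvPricesB seed)) = _
    rw [hchg, firstB_eq, two_stage _ PySem.Dict.empty (pvMapSum lk) PySem.Dict.nodup_keys_empty,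
      buyerA_eq_wins]
    exact f1
  · rw [buyerA_eq_wins]; exact f2
  · rw [buyerA_eq_wins]; exact f3

lemma outer_sim (xs : List Int) :
    ∀ (s : Int) (lk : PySem.Dict (List Int) (PySem.Dict Int Int)),
    lk.keys.Nodup → (∀ t b, s ≤ b → (lk.getD t PySem.Dict.empty).contains b = false) →
      xs.foldl pvBuyerR2 (pvMapSum lk)
        = pvMapSum ((PySem.List.enumerate xs s).foldl (fun lk p => pvBuyerR lk p.1 p.2) lk)
    ∧ ((PySem.List.enumerate xs s).foldl (fun lk p => pvBuyerR lk p.1 p.2) lk).keys.Nodup := by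
  induction xs with
  | nil =>
    intro s lk hn _
    rw [PySem.List.enumerate_nil]
    exact ⟨rfl, hn⟩
  | cons x xs ih =>
    intro s lk hn hf
    rw [PySem.List.enumerate_cons]
    simp only [List.foldl_cons]
    obtain ⟨hB, hnd', hunch⟩ := buyer_sim lk s x hn (fun t => hf t s le_rfl)
    have hf' : ∀ t b, s + 1 ≤ b → ((pvBuyerR lk s x).getD t PySem.Dict.empty).contains b = false := by
      intro t b hb
      rw [hunch t b (by omega)]
      exact hf t b (by omega)
    obtain ⟨ih1, ih2⟩ := ih (s + 1) (pvBuyerR lk s x) hnd' hf'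
    rw [hB]
    exact ⟨ih1, ih2⟩

lemma finish_sim (L : PySem.Dict (List Int) (PySem.Dict Int Int)) (h : L.keys.Nodup) :
    pvFinishBR (pvMapSum L) = pvFinishAR L := by
  have hsc : (fun t => (pvMapSum L).getD t 0)
      = (fun t => ((L.getD t PySem.Dict.empty).values).sum) :=
    funext (getD_pvMapSum L h)
  rw [pvFinishBR, pvFinishAR, keys_pvMapSum, hsc]
  cases hm : PySem.List.max? L.keys (fun t => ((L.getD t PySem.Dict.empty).values).sum) with
  | none => rfl
  | some best =>
    show (best, (pvMapSum L).getD best 0) = (best, ((L.getD best PySem.Dict.empty).values).sum)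
    rw [getD_pvMapSum L h best]
    rfl

lemma ref_main_eq (buyers : List Int) : pvGbsAR buyers = pvGbsBR buyers := by
  have hnd0 : (PySem.Dict.empty : PySem.Dict (List Int) (PySem.Dict Int Int)).keys.Nodup :=
    PySem.Dict.nodup_keys_empty
  have hf0 : ∀ (t : List Int) (b : Int), (0 : Int) ≤ b →
      ((PySem.Dict.empty : PySem.Dict (List Int) (PySem.Dict Int Int)).getD t
        PySem.Dict.empty).contains b = false := by
    intro t b _
    rw [PySem.Dict.getD_of_not_contains _ _ (PySem.Dict.contains_empty t)]
    exact PySem.Dict.contains_empty b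
  obtain ⟨hEq, hNd⟩ := outer_sim buyers 0 PySem.Dict.empty hnd0 hf0
  have hAfold : (PySem.List.pyRange 0 (PySem.List.len buyers)).foldl
      (fun lk buyer => pvBuyerR lk buyer (PySem.List.pyGetD buyers buyer 0)) PySem.Dict.empty
      = (PySem.List.enumerate buyers).foldl (fun lk p => pvBuyerR lk p.1 p.2) PySem.Dict.empty := by
    rw [PySem.List.enumerate_eq_map_pyRange buyers 0, List.foldl_map]
  have hB0 : buyers.foldl pvBuyerR2 (PySem.Dict.empty : PySem.Dict (List Int) Int)
      = buyers.foldl pvBuyerR2 (pvMapSum PySem.Dict.empty) := rfl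
  rw [pvGbsAR, pvGbsBR, hAfold, hB0, hEq]
  exact (finish_sim _ hNd).symm


-- ===== the dict bridge: pvFD realizes PySem.Dict =====
def pvFDtoDict {ν : Type} (d : pvFD ν) (dflt : ν) : PySem.Dict (List Int) ν :=
  PySem.Dict.mk (d.items dflt)

def pvInv {ν : Type} (d : pvFD ν) : Prop :=
  d.rk.Nodup ∧ ∀ k, d.hm.contains k = decide (k ∈ d.rk)

lemma pvInv_empty {ν : Type} : pvInv (pvFD.empty (ν := ν)) := by
  constructor
  · exact List.nodup_nil
  · intro k
    simp [pvFD.empty]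

lemma toDict_empty {ν : Type} (dflt : ν) : pvFDtoDict pvFD.empty dflt = PySem.Dict.empty := rfl

lemma keys_toDict {ν : Type} (d : pvFD ν) (dflt : ν) :
    (pvFDtoDict d dflt).keys = d.keysInOrder := by
  simp [pvFDtoDict, pvFD.items, PySem.Dict.keys, Function.comp_def]

lemma contains_toDict {ν : Type} (d : pvFD ν) (dflt : ν) (h : pvInv d) (k : List Int) :
    (pvFDtoDict d dflt).contains k = d.contains k := by
  rw [PySem.Dict.contains_eq_decide_mem_keys, keys_toDict, pvFD.contains, h.2 k,
    pvFD.keysInOrder]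
  simp

lemma getD_toDict {ν : Type} (d : pvFD ν) (dflt : ν) (h : pvInv d) (k : List Int) :
    (pvFDtoDict d dflt).getD k dflt = d.getD k dflt := by
  by_cases hk : k ∈ d.rk
  · have hnodup : (pvFDtoDict d dflt).keys.Nodup := by
      rw [keys_toDict]; exact (List.nodup_reverse).mpr h.1
    have hmem : (k, d.getD k dflt) ∈ (pvFDtoDict d dflt).items := by
      show _ ∈ d.items dflt
      exact List.mem_map_of_mem (by simpa [pvFD.keysInOrder] using hk)
    exact PySem.Dict.getD_of_mem_items _ hmem hnodup _
  · rw [PySem.Dict.getD_of_not_contains _ _ (by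
      rw [contains_toDict d dflt h, pvFD.contains, h.2 k]; simpa using hk)]
    rw [pvFD.getD, Std.HashMap.getD_eq_fallback_of_contains_eq_false (by rw [h.2 k]; simpa using hk)]

lemma toDict_insert {ν : Type} (d : pvFD ν) (dflt : ν) (h : pvInv d) (k : List Int) (v : ν) :
    pvFDtoDict (d.insert k v) dflt = (pvFDtoDict d dflt).insert k v ∧ pvInv (d.insert k v) := by
  have hGD : ∀ a, (d.hm.insert k v).getD a dflt = if a = k then v else d.hm.getD a dflt := by
    intro a
    rw [Std.HashMap.getD_insert]
    by_cases ha : a = k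
    · simp [ha]
    · simp [ha, Ne.symm ha]
  by_cases hk : k ∈ d.rk
  · have hc : d.hm.contains k = true := by rw [h.2 k]; simpa using hk
    have hrk : (d.insert k v).rk = d.rk := by unfold pvFD.insert; simp [hc]
    constructor
    · apply PySem.Dict.ext
      rw [show (pvFDtoDict (d.insert k v) dflt).items = (d.insert k v).items dflt from rfl,
        PySem.Dict.items_insert_of_contains _ _ (by rw [contains_toDict d dflt h, pvFD.contains]; exact hc),
        show (pvFDtoDict d dflt).items = d.items dflt from rfl]
      unfold pvFD.items pvFD.keysInOrder
      rw [hrk, List.map_map]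
      apply List.map_congr_left
      intro a _
      by_cases ha : a = k
      · simp [ha, pvFD.insert, pvFD.getD, hGD]
      · simp [ha, pvFD.insert, pvFD.getD, hGD]
    · refine ⟨by rw [hrk]; exact h.1, ?_⟩
      intro a
      show (d.hm.insert k v).contains a = _
      rw [hrk, Std.HashMap.contains_insert, h.2 a]
      by_cases ha : a = k
      · subst ha; simp [hk]
      · simp [Ne.symm ha]
  · have hc : d.hm.contains k = false := by rw [h.2 k]; simpa using hk
    have hrk : (d.insert k v).rk = k :: d.rk := by unfold pvFD.insert; simp [hc]
    constructor
    · apply PySem.Dict.ext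
      rw [show (pvFDtoDict (d.insert k v) dflt).items = (d.insert k v).items dflt from rfl,
        PySem.Dict.items_insert_of_not_contains _ _ (by rw [contains_toDict d dflt h, pvFD.contains]; exact hc),
        show (pvFDtoDict d dflt).items = d.items dflt from rfl]
      unfold pvFD.items pvFD.keysInOrder
      rw [hrk, List.reverse_cons, List.map_append]
      congr 1
      · apply List.map_congr_left
        intro a ha'
        have ha : a ≠ k := fun hx => hk (by rw [← hx]; simpa using ha')
        simp [pvFD.insert, pvFD.getD, hGD, ha]
      · simp [pvFD.insert, pvFD.getD, hGD]
    · refine ⟨by rw [hrk]; exact List.nodup_cons.mpr ⟨hk, h.1⟩, ?_⟩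
      intro a
      show (d.hm.insert k v).contains a = _
      rw [hrk, Std.HashMap.contains_insert, h.2 a]
      by_cases ha : a = k
      · subst ha; simp
      · simp [ha, Ne.symm ha]

lemma toDict_setdefault (d : pvFD Int) (h : pvInv d) (k : List Int) (v : Int) :
    pvFDtoDict (d.setdefault k v) 0 = (pvFDtoDict d 0).setdefault k v ∧ pvInv (d.setdefault k v) := by
  unfold pvFD.setdefault
  by_cases hc : d.contains k = true
  · rw [PySem.Dict.setdefault_of_contains _ v (by rw [contains_toDict d 0 h]; exact hc)]
    simp [hc, h]
  · have hcf : d.contains k = false := by simpa using hc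
    rw [PySem.Dict.setdefault_of_not_contains _ v (by rw [contains_toDict d 0 h]; exact hcf)]
    simp only [hcf, Bool.false_eq_true, if_false]
    exact toDict_insert d 0 h k v

-- ===== lifting the bridge through both ports =====
lemma updA_bridge (b : Int) (lk : pvFD (PySem.Dict Int Int)) (t : List Int) (p : Int) (h : pvInv lk) :
    pvFDtoDict (pvUpdA b lk t p) PySem.Dict.empty
      = pvUpdR b (pvFDtoDict lk PySem.Dict.empty) t p ∧ pvInv (pvUpdA b lk t p) := by
  unfold pvUpdA pvUpdR
  rw [contains_toDict lk _ h]
  by_cases hc : lk.contains t = true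
  · simp only [hc, if_true]
    rw [getD_toDict lk _ h]
    by_cases hb : (lk.getD t PySem.Dict.empty).contains b = true
    · simp [hb, h]
    · simp only [hb, Bool.false_eq_true, if_false]
      exact toDict_insert lk _ h t _
  · simp only [hc, Bool.false_eq_true, if_false]
    obtain ⟨e1, e2⟩ := toDict_insert lk PySem.Dict.empty h t PySem.Dict.empty
    have hins : (lk.insert t PySem.Dict.empty).getD t PySem.Dict.empty = PySem.Dict.empty := by
      unfold pvFD.insert pvFD.getD
      rw [Std.HashMap.getD_insert]
      simp
    have hinsR : ((pvFDtoDict lk PySem.Dict.empty).insert t PySem.Dict.empty).getD t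
        PySem.Dict.empty = PySem.Dict.empty := by rw [PySem.Dict.getD_insert_self]
    rw [hins, hinsR, show (PySem.Dict.empty : PySem.Dict Int Int).contains b = false from
      PySem.Dict.contains_empty b]
    simp only [Bool.false_eq_true, if_false]
    obtain ⟨f1, f2⟩ := toDict_insert (lk.insert t PySem.Dict.empty) PySem.Dict.empty e2 t
      (PySem.Dict.empty.insert b p)
    exact ⟨by rw [f1, e1], f2⟩

lemma foldA_bridge (b : Int) (l : List Int) :
    ∀ (st : List Int × Int × Int) (lk : pvFD (PySem.Dict Int Int)), pvInv lk →
      pvFDtoDict (l.foldl (pvStepA b) (st, lk)).2 PySem.Dict.empty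
          = (l.foldl (pvStepR b) (st, pvFDtoDict lk PySem.Dict.empty)).2
      ∧ pvInv (l.foldl (pvStepA b) (st, lk)).2 := by
  induction l with
  | nil => exact fun st lk h => ⟨rfl, h⟩
  | cons i l ih =>
    intro st lk h
    obtain ⟨e1, e2⟩ := updA_bridge b lk (pvGen st).1 (pvGen st).2.1 h
    simp only [List.foldl_cons]
    have hstep : pvStepR b (st, pvFDtoDict lk PySem.Dict.empty) i
        = (pvGen st, pvFDtoDict (pvUpdA b lk (pvGen st).1 (pvGen st).2.1) PySem.Dict.empty) := by
      rw [show pvStepR b (st, pvFDtoDict lk PySem.Dict.empty) i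
          = (pvGen st, pvUpdR b (pvFDtoDict lk PySem.Dict.empty) (pvGen st).1 (pvGen st).2.1) from rfl, e1]
    rw [hstep]
    exact ih (pvGen st) (pvUpdA b lk (pvGen st).1 (pvGen st).2.1) e2

lemma buyerA_bridge (lk : pvFD (PySem.Dict Int Int)) (b seed : Int) (h : pvInv lk) :
    pvFDtoDict (pvBuyerA lk b seed) PySem.Dict.empty
      = pvBuyerR (pvFDtoDict lk PySem.Dict.empty) b seed ∧ pvInv (pvBuyerA lk b seed) := by
  exact foldA_bridge b (PySem.List.pyRange 3 2000) _ lk h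

lemma finishA_bridge (lk : pvFD (PySem.Dict Int Int)) (h : pvInv lk) :
    pvFinishA lk = pvFinishAR (pvFDtoDict lk PySem.Dict.empty) := by
  unfold pvFinishA pvFinishAR
  rw [keys_toDict,
    show (fun t => ((pvFDtoDict lk PySem.Dict.empty).getD t PySem.Dict.empty).values.sum)
      = (fun t => ((lk.getD t PySem.Dict.empty).values).sum) from
        funext (fun t => by rw [getD_toDict lk _ h])]
  cases PySem.List.max? lk.keysInOrder (fun t => ((lk.getD t PySem.Dict.empty).values).sum) with
  | none => rfl
  | some best =>
    exact congrArg (fun v => (best, (PySem.Dict.values v).sum)) (getD_toDict lk PySem.Dict.empty h best).symm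

lemma gbsA_bridge (buyers : List Int) : get_best_sequence buyers = pvGbsAR buyers := by
  unfold get_best_sequence pvGbsAR
  have main : ∀ (l : List Int) (lk : pvFD (PySem.Dict Int Int)), pvInv lk →
      pvFDtoDict (l.foldl (fun lk buyer => pvBuyerA lk buyer (PySem.List.pyGetD buyers buyer 0)) lk) PySem.Dict.empty
        = l.foldl (fun lk buyer => pvBuyerR lk buyer (PySem.List.pyGetD buyers buyer 0)) (pvFDtoDict lk PySem.Dict.empty)
      ∧ pvInv (l.foldl (fun lk buyer => pvBuyerA lk buyer (PySem.List.pyGetD buyers buyer 0)) lk) := by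
    intro l
    induction l with
    | nil => exact fun lk h => ⟨rfl, h⟩
    | cons i l ih =>
      intro lk h
      obtain ⟨e1, e2⟩ := buyerA_bridge lk i (PySem.List.pyGetD buyers i 0) h
      simp only [List.foldl_cons]
      rw [← e1]
      exact ih _ e2
  obtain ⟨e1, e2⟩ := main (PySem.List.pyRange 0 (PySem.List.len buyers)) pvFD.empty pvInv_empty
  rw [finishA_bridge _ e2, e1, toDict_empty]

-- B side
lemma firstB_bridge (changes prices : List Int) :
    pvFDtoDict (pvFirstB changes prices) 0 = pvFirstR changes prices ∧ pvInv (pvFirstB changes prices) := by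
  unfold pvFirstB pvFirstR
  generalize PySem.List.pyRange 0 (PySem.List.len changes - 3) = l
  have main : ∀ (l : List Int) (d : pvFD Int), pvInv d →
      pvFDtoDict (l.foldl (fun d i => d.setdefault (PySem.List.slice changes (some i) (some (i + 4)))
          (PySem.List.pyGetD prices (i + 4) 0)) d) 0
        = l.foldl (fun d i => d.setdefault (PySem.List.slice changes (some i) (some (i + 4)))
            (PySem.List.pyGetD prices (i + 4) 0)) (pvFDtoDict d 0)
      ∧ pvInv (l.foldl (fun d i => d.setdefault (PySem.List.slice changes (some i) (some (i + 4)))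
          (PySem.List.pyGetD prices (i + 4) 0)) d) := by
    intro l
    induction l with
    | nil => exact fun d h => ⟨rfl, h⟩
    | cons i l ih =>
      intro d h
      obtain ⟨e1, e2⟩ := toDict_setdefault d h (PySem.List.slice changes (some i) (some (i + 4)))
        (PySem.List.pyGetD prices (i + 4) 0)
      simp only [List.foldl_cons]
      rw [← e1]
      exact ih _ e2
  obtain ⟨e1, e2⟩ := main l pvFD.empty pvInv_empty
  rw [e1, toDict_empty]
  exact ⟨rfl, e2⟩

lemma mergeB_bridge (totals first : pvFD Int) (ht : pvInv totals) :
    pvFDtoDict (pvMergeB totals first) 0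
      = pvMergeR (pvFDtoDict totals 0) (pvFDtoDict first 0) ∧ pvInv (pvMergeB totals first) := by
  unfold pvMergeB pvMergeR
  rw [show (pvFDtoDict first 0).items = first.items 0 from rfl]
  generalize first.items 0 = l
  induction l generalizing totals with
  | nil => exact ⟨rfl, ht⟩
  | cons q l ih =>
    simp only [List.foldl_cons]
    rw [getD_toDict totals 0 ht q.1]
    obtain ⟨e1, e2⟩ := toDict_insert totals 0 ht q.1 (totals.getD q.1 0 + q.2)
    obtain ⟨f1, f2⟩ := ih (totals.insert q.1 (totals.getD q.1 0 + q.2)) e2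
    rw [f1, e1]
    exact ⟨rfl, f2⟩

lemma buyerB_bridge (totals : pvFD Int) (seed : Int) (h : pvInv totals) :
    pvFDtoDict (pvBuyerB totals seed) 0
      = pvBuyerR2 (pvFDtoDict totals 0) seed ∧ pvInv (pvBuyerB totals seed) := by
  obtain ⟨e1, e2⟩ := firstB_bridge (pvChangesB (pvPricesB seed)) (pvPricesB seed)
  obtain ⟨f1, f2⟩ := mergeB_bridge totals (pvFirstB (pvChangesB (pvPricesB seed)) (pvPricesB seed)) h
  refine ⟨?_, f2⟩
  show pvFDtoDict (pvMergeB totals _) 0 = pvMergeR (pvFDtoDict totals 0) (pvFirstR _ _)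
  rw [f1, e1]

lemma finishB_bridge (totals : pvFD Int) (h : pvInv totals) :
    pvFinishB totals = pvFinishBR (pvFDtoDict totals 0) := by
  unfold pvFinishB pvFinishBR
  rw [keys_toDict,
    show (fun t => (pvFDtoDict totals 0).getD t 0) = (fun t => totals.getD t 0) from
      funext (fun t => by rw [getD_toDict totals 0 h])]
  cases PySem.List.max? totals.keysInOrder (fun t => totals.getD t 0) with
  | none => rfl
  | some best => exact congrArg (fun v => (best, v)) (getD_toDict totals 0 h best).symm

lemma gbsB_bridge (buyers : List Int) : get_best_sequence_alt buyers = pvGbsBR buyers := by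
  unfold get_best_sequence_alt pvGbsBR
  have main : ∀ (l : List Int) (d : pvFD Int), pvInv d →
      pvFDtoDict (l.foldl pvBuyerB d) 0 = l.foldl pvBuyerR2 (pvFDtoDict d 0)
      ∧ pvInv (l.foldl pvBuyerB d) := by
    intro l
    induction l with
    | nil => exact fun d h => ⟨rfl, h⟩
    | cons i l ih =>
      intro d h
      obtain ⟨e1, e2⟩ := buyerB_bridge d i h
      simp only [List.foldl_cons]
      rw [← e1]
      exact ih _ e2
  obtain ⟨e1, e2⟩ := main buyers pvFD.empty pvInv_empty
  rw [finishB_bridge _ e2, e1, toDict_empty]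

lemma main_eq (buyers : List Int) : get_best_sequence buyers = get_best_sequence_alt buyers := by
  rw [gbsA_bridge, gbsB_bridge]
  exact ref_main_eq buyers

-- ===== VERDICT (by name: the statement is the Claim_ definition above) =====
theorem get_best_sequence_spec : Claim_equal_get_best_sequence := by
  intro buyers _ _
  unfold Spec_get_best_sequence
  exact main_eq buyers
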